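-- pv_equiv track=rewrite | github.com/oliwiakaluzinska/prg-basics | mocktest2/p10.py | f
-- ===== SOURCE A (Python) =====
-- def f(array):
--     minimum = array[0][0]
--     for i in array:
--         for j in i:
--             if j < minimum:
--                 minimum = j
--
--     for x in range(len(array)):
--         for y in range(len(array[x])):
--           if minimum == array[x][y] and x == y:
--             return True
--     return False
-- ===== SOURCE B (Python) =====
-- def f(array):
--     # single pass: track the running minimum and whether it currently occurs on the diagonal
--     minimum = array[0][0]
--     on_diag = False
--     for x, row in enumerate(array):
--         for y, j in enumerate(row):
--             if j < minimum:
--                 minimum = j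
--                 on_diag = (x == y)
--             elif j == minimum and x == y:
--                 on_diag = True
--     return on_diag
-- ===== Notes on version B (the rewrite author's own statement) =====
-- stated objective: alternative
-- what changed: B fuses A's two staged passes (full running-min scan, then a second full nested scan filtered on x==y) into ONE pass with a two-component accumulator: it walks the cells once, and on finding a strictly smaller value resets the on-diagonal flag, on finding a diagonal cell equal to the current minimum sets it.
import Mathlib
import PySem

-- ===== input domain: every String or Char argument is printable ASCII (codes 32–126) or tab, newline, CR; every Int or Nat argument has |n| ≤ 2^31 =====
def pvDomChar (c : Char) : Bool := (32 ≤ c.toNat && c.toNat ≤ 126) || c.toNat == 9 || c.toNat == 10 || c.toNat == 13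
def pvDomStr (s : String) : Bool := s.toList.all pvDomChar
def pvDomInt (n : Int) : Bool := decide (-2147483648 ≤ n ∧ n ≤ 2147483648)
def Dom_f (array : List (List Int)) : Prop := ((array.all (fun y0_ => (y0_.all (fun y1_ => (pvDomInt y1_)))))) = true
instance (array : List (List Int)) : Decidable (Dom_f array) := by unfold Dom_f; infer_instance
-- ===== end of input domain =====

-- B fuses A's two staged full scans into ONE pass over the cells with a (minimum, on_diag)
-- accumulator: a strictly smaller value resets the flag, a diagonal cell equal to the current
-- minimum sets it. Alternative decomposition, same overall cost.

-- ===== PORT A =====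
-- literal transliteration of A: seed minimum = array[0][0], running-min double loop,
-- then nested index loops with early return True (Bool-valued, so 'any' over the ranges).
def f (array : List (List Int)) : Bool :=
  match PySem.List.pyGet? array 0 with
  | none => false  -- array[0] raises IndexError: outside Pre_f
  | some row0 =>
    match PySem.List.pyGet? row0 0 with
    | none => false  -- array[0][0] raises IndexError: outside Pre_f
    | some m0 =>
      let minimum := array.foldl (fun m i => i.foldl (fun m j => if j < m then j else m) m) m0
      (List.range array.length).any (fun x =>
        let row := array.getD x []
        (List.range row.length).any (fun y => minimum == row.getD y 0 && x == y))

-- ===== PORT B =====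
-- transliteration of Source B: one nested enumerate loop over a (minimum, on_diag) state.
def f_alt (array : List (List Int)) : Bool :=
  match PySem.List.pyGet? array 0 with
  | none => false  -- array[0][0] raises IndexError: outside Pre_f
  | some row0 =>
    match PySem.List.pyGet? row0 0 with
    | none => false  -- array[0][0] raises IndexError: outside Pre_f
    | some m0 =>
      let s := (PySem.List.enumerate array 0).foldl
        (fun (s : Int × Bool) (xr : Int × List Int) =>
          (PySem.List.enumerate xr.2 0).foldl
            (fun (s : Int × Bool) (yj : Int × Int) =>
              if yj.2 < s.1 then (yj.2, xr.1 == yj.1)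
              else if yj.2 == s.1 && xr.1 == yj.1 then (s.1, true)
              else s) s)
        (m0, false)
      s.2

-- ===== PRECONDITION & SPEC =====
-- Pre_f excludes exactly the inputs where A raises IndexError on array[0][0]:
-- the empty array and an array whose first row is empty.
def Pre_f (array : List (List Int)) : Prop := array ≠ [] ∧ array.headD [] ≠ []
instance (array : List (List Int)) : Decidable (Pre_f array) := by unfold Pre_f; infer_instance
def pvWitness_f : List (List Int) := [[3, 1], [2, 1]]

def Spec_f (array : List (List Int)) (out : Bool) : Prop := out = f_alt array
instance (array : List (List Int)) (out : Bool) : Decidable (Spec_f array out) := by unfold Spec_f; infer_instance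

-- ===== CLAIM (what is proved, stated in full; the proofs are below) =====
def Claim_equal_f : Prop := ∀ (array : List (List Int)), Dom_f array → Pre_f array → Spec_f array (f array)

-- ===== LEMMAS AND PROOFS =====

-- a cell is (x, y, value); B's loop body as a function of the whole cell
def cellStep (s : Int × Bool) (c : Int × Int × Int) : Int × Bool :=
  if c.2.2 < s.1 then (c.2.2, c.1 == c.2.1)
  else if c.2.2 == s.1 && c.1 == c.2.1 then (s.1, true)
  else s

-- the array flattened to its cells, diagonal-agnostic
def cells (array : List (List Int)) : List (Int × Int × Int) :=
  (PySem.List.enumerate array 0).flatMap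
    (fun xr => (PySem.List.enumerate xr.2 0).map (fun yj => (xr.1, yj)))

def minfold (L : List (Int × Int × Int)) (m0 : Int) : Int :=
  L.foldl (fun m c => min m c.2.2) m0

-- A's running-min update is 'min'.
theorem step_eq_min : (fun (m j : Int) => if j < m then j else m) = min := by
  funext m j
  simp [min_def]
  omega

-- A's nested loop is a fold over the flattened array.
theorem nested_foldl_min (array : List (List Int)) (init : Int) :
    array.foldl (fun m i => i.foldl (fun m j => if j < m then j else m) m) init
      = array.flatten.foldl min init := by
  rw [step_eq_min, List.foldl_flatten]

theorem minfold_le_init (L : List (Int × Int × Int)) (m0 : Int) : minfold L m0 ≤ m0 := by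
  induction L generalizing m0 with
  | nil => simp [minfold]
  | cons a t ih =>
    calc minfold (a :: t) m0 = minfold t (min m0 a.2.2) := rfl
    _ ≤ min m0 a.2.2 := ih _
    _ ≤ m0 := min_le_left _ _

theorem minfold_le_mem (L : List (Int × Int × Int)) (m0 : Int) (c : Int × Int × Int)
    (hc : c ∈ L) : minfold L m0 ≤ c.2.2 := by
  induction L generalizing m0 with
  | nil => cases hc
  | cons a t ih =>
    rcases List.mem_cons.mp hc with h | h
    · subst h
      calc minfold (c :: t) m0 = minfold t (min m0 c.2.2) := rfl
      _ ≤ min m0 c.2.2 := minfold_le_init _ _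
      _ ≤ c.2.2 := min_le_right _ _
    · exact ih _ h

theorem minfold_append (L : List (Int × Int × Int)) (c : Int × Int × Int) (m0 : Int) :
    minfold (L ++ [c]) m0 = min (minfold L m0) c.2.2 := by
  simp [minfold, List.foldl_append]

-- INVARIANT of B's fused pass: the first component is the running minimum, the second says
-- whether some diagonal cell seen so far equals that minimum.
theorem fold_inv (L : List (Int × Int × Int)) (m0 : Int) :
    L.foldl cellStep (m0, false)
      = (minfold L m0, decide (∃ c ∈ L, c.1 = c.2.1 ∧ c.2.2 = minfold L m0)) := by
  induction L using List.reverseRecOn with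
  | nil => simp [minfold]
  | append_singleton L c ih =>
    rw [List.foldl_append, ih, minfold_append]
    simp only [List.foldl_cons, List.foldl_nil]
    by_cases hlt : c.2.2 < minfold L m0
    · have hmin : min (minfold L m0) c.2.2 = c.2.2 := by omega
      rw [hmin]
      simp only [cellStep, if_pos hlt]
      congr 1
      rw [Bool.eq_iff_iff]
      simp only [beq_iff_eq, decide_eq_true_eq]
      constructor
      · intro h; exact ⟨c, by simp, h, rfl⟩
      · rintro ⟨c', hc', hdiag, hval⟩
        rcases List.mem_append.mp hc' with h | h
        · exact absurd hval (by have := minfold_le_mem L m0 c' h; omega)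
        · simp at h; subst h; exact hdiag
    · have hmin : min (minfold L m0) c.2.2 = minfold L m0 := by omega
      rw [hmin]
      simp only [cellStep, if_neg hlt]
      by_cases heq : c.2.2 = minfold L m0 ∧ c.1 = c.2.1
      · rw [if_pos (by simp [heq.1, heq.2])]
        congr 1
        symm
        simp only [decide_eq_true_eq]
        exact ⟨c, by simp, heq.2, heq.1⟩
      · rw [if_neg (by simpa [Bool.and_eq_true, and_comm] using heq)]
        congr 1
        rw [Bool.eq_iff_iff]
        simp only [decide_eq_true_eq]
        constructor
        · rintro ⟨c', hc', h1, h2⟩; exact ⟨c', List.mem_append_left _ hc', h1, h2⟩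
        · rintro ⟨c', hc', h1, h2⟩
          rcases List.mem_append.mp hc' with h | h
          · exact ⟨c', h, h1, h2⟩
          · simp at h; subst h; exact absurd ⟨h2, h1⟩ heq

-- generic: fold over a flatMap is the nested fold
theorem foldl_flatMap_eq {α β γ : Type} (l : List α) (g : α → List β) (fn : γ → β → γ)
    (init : γ) : (l.flatMap g).foldl fn init = l.foldl (fun acc x => (g x).foldl fn acc) init := by
  induction l generalizing init with
  | nil => rfl
  | cons a t ih => simp [List.flatMap_cons, List.foldl_append, ih]

-- B's nested enumerate fold is the cellStep fold over the flat cell list.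
theorem nestedB (array : List (List Int)) (init : Int × Bool) :
    (PySem.List.enumerate array 0).foldl
        (fun (s : Int × Bool) (xr : Int × List Int) =>
          (PySem.List.enumerate xr.2 0).foldl
            (fun (s : Int × Bool) (yj : Int × Int) =>
              if yj.2 < s.1 then (yj.2, xr.1 == yj.1)
              else if yj.2 == s.1 && xr.1 == yj.1 then (s.1, true)
              else s) s) init
      = (cells array).foldl cellStep init := by
  rw [cells, foldl_flatMap_eq]
  congr 1
  funext acc xr
  rw [List.foldl_map]
  rfl

-- the values of the cells are the flattened array
theorem cells_vals (array : List (List Int)) :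
    (cells array).map (fun c => c.2.2) = array.flatten := by
  simp only [cells, List.map_flatMap, List.map_map]
  have h1 : ∀ xr : Int × List Int,
      (PySem.List.enumerate xr.2 0).map ((fun c : Int × Int × Int => c.2.2) ∘ (fun yj => (xr.1, yj)))
        = xr.2 := by
    intro xr
    simp [Function.comp_def]
  rw [List.flatMap_congr (h := fun xr _ => h1 xr)]
  have h2 : List.flatMap (Prod.snd) (PySem.List.enumerate array 0)
      = ((PySem.List.enumerate array 0).map Prod.snd).flatten := by
    simp [List.flatMap_def]
  rw [h2, PySem.List.map_snd_enumerate]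

theorem minfold_cells (array : List (List Int)) (m0 : Int) :
    minfold (cells array) m0 = array.flatten.foldl min m0 := by
  rw [minfold, ← List.foldl_map (f := fun c : Int × Int × Int => c.2.2) (g := min), cells_vals]

-- membership in the cell list
theorem mem_cells (array : List (List Int)) (c : Int × Int × Int) :
    c ∈ cells array
      ↔ ∃ (x : Nat) (hx : x < array.length) (y : Nat) (hy : y < array[x].length),
          c = ((x : Int), (y : Int), array[x][y]) := by
  simp only [cells, List.mem_flatMap, List.mem_map, PySem.List.mem_enumerate_iff]
  constructor
  · rintro ⟨xr, ⟨x, hx, rfl⟩, yj, ⟨y, hy, rfl⟩, rfl⟩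
    exact ⟨x, hx, y, by simpa using hy, by simp⟩
  · rintro ⟨x, hx, y, hy, rfl⟩
    exact ⟨((x : Int), array[x]), ⟨x, hx, by simp⟩,
      ((y : Int), array[x][y]), ⟨y, hy, by simp⟩, by simp⟩

-- characterisation of A's second pass
theorem passA_iff (array : List (List Int)) (M : Int) :
    ((List.range array.length).any (fun x =>
        let row := array.getD x []
        (List.range row.length).any (fun y => M == row.getD y 0 && x == y)) = true)
      ↔ ∃ k, ∃ h : k < array.length, k < array[k].length ∧ array[k].getD k 0 = M := by
  simp only [List.any_eq_true, List.mem_range, Bool.and_eq_true, beq_iff_eq]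
  constructor
  · rintro ⟨x, hx, y, hy, hM, hxy⟩
    subst hxy
    rw [List.getD_eq_getElem array [] hx] at hy hM
    refine ⟨x, hx, hy, ?_⟩
    rw [List.getD_eq_getElem?_getD]
    exact hM.symm
  · rintro ⟨k, hk, hlen, hval⟩
    refine ⟨k, hk, k, ?_, ?_, rfl⟩
    · rw [List.getD_eq_getElem array [] hk]
      exact hlen
    · rw [List.getD_eq_getElem array [] hk, List.getD_eq_getElem?_getD]
      exact hval.symm

-- characterisation of B's flag (via mem_cells)
theorem flag_iff (array : List (List Int)) (M : Int) :
    (∃ c ∈ cells array, c.1 = c.2.1 ∧ c.2.2 = M)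
      ↔ ∃ k, ∃ h : k < array.length, k < array[k].length ∧ array[k].getD k 0 = M := by
  constructor
  · rintro ⟨c, hc, hdiag, hval⟩
    obtain ⟨x, hx, y, hy, rfl⟩ := (mem_cells array c).mp hc
    simp only at hdiag hval
    have hxy : x = y := by exact_mod_cast hdiag
    subst hxy
    refine ⟨x, hx, hy, ?_⟩
    rw [List.getD_eq_getElem?_getD, List.getElem?_eq_getElem hy]
    exact hval
  · rintro ⟨k, hk, hlen, hval⟩
    refine ⟨((k : Int), (k : Int), array[k][k]), (mem_cells array _).mpr ⟨k, hk, k, hlen, rfl⟩,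
      rfl, ?_⟩
    rw [List.getD_eq_getElem?_getD, List.getElem?_eq_getElem hlen] at hval
    exact hval

-- ===== VERDICT (by name: the statement is the Claim_ definition above) =====
theorem f_spec : Claim_equal_f := by
  intro array _ hpre
  obtain ⟨hne, hhd⟩ := hpre
  obtain ⟨row0, rest, rfl⟩ : ∃ r t, array = r :: t := by
    cases array with
    | nil => exact absurd rfl hne
    | cons a t => exact ⟨a, t, rfl⟩
  obtain ⟨m0, t0, rfl⟩ : ∃ m t, row0 = m :: t := by
    cases row0 with
    | nil => simp at hhd
    | cons a t => exact ⟨a, t, rfl⟩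
  unfold Spec_f f f_alt
  have hget1 : PySem.List.pyGet? ((m0 :: t0) :: rest) 0 = some (m0 :: t0) := by
    simp [PySem.List.pyGet?, PySem.List.pyIdx?]
  have hget2 : PySem.List.pyGet? (m0 :: t0) 0 = some m0 := by
    simp [PySem.List.pyGet?, PySem.List.pyIdx?]
  simp only [hget1, hget2]
  rw [nestedB, fold_inv, nested_foldl_min, minfold_cells]
  rw [Bool.eq_iff_iff, passA_iff]
  simp only [decide_eq_true_eq]
  exact (flag_iff _ _).symm
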